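-- pv_equiv track=rewrite | github.com/ec-jrc/SMDRM | transform_tweets/src/transformations.py | extract_place_candidates
-- ===== SOURCE A (Python) =====
-- import typing
--
-- def extract_place_candidates(y_hat: typing.List[list], allowed_tags: typing.List[str]) -> dict:
--     """Extract place candidates given a set of tags allowed by the user."""
--
--     places = dict()
--     for index, (tokens, tags) in enumerate(y_hat):
--         places[index] = dict()
--         for tag_id, tag in enumerate(tags):
--             # place candidate always begin with B-<tag>
--             if "B-" in tag:
--                 _, tag_root = tag.split("-")
--
--                 # create a dictionary for this tag
--                 if tag in allowed_tags and tag_root not in places[index]: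
--                     places[index][tag_root] = []
--
--                 # rebuild the place candidate using I-inside tags
--                 subset = []
--                 future_tags = tags[tag_id:]
--                 for ftid, future_tag in enumerate(future_tags, start=tag_id):
--                     # break place candidate rebuilding when an unknown tag is reached
--                     if future_tag not in allowed_tags:
--                         break
--                     subset.append(tokens[ftid])
--
--                 # subset exists if place candidates are found
--                 if subset:
--                     places[index][tag_root].append(" ".join(subset))
--     return places
-- ===== SOURCE B (Python) =====
-- def extract_place_candidates(y_hat, allowed_tags):
--     """Extract place candidates given a set of tags allowed by the user."""
--     allowed = set(allowed_tags)
--     places = {}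
--     for index, (tokens, tags) in enumerate(y_hat):
--         entry = {}
--         i, n = 0, len(tags)
--         while i < n:
--             if tags[i] not in allowed:
--                 i += 1
--                 continue
--             # maximal run of allowed tags starting at i; every span inside ends at e
--             e = i + 1
--             while e < n and tags[e] in allowed:
--                 e += 1
--             for j, tag in enumerate(tags[i:e], start=i):
--                 if "B-" in tag:
--                     root = tag.split("-")[1]
--                     entry.setdefault(root, []).append(" ".join(tokens[k] for k in range(j, e)))
--             i = e
--         places[index] = entry
--     return places
-- ===== Notes on version B (the rewrite author's own statement) =====
-- stated objective: alternative
-- what changed: A restarts a nested forward scan at every B- tag to rebuild each candidate; B first segments the tag sequence into maximal runs of allowed tags with a two-pointer while loop and then, inside each run, emits every B- span directly to the run's end via setdefault, never rescanning tags.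
import Mathlib
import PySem

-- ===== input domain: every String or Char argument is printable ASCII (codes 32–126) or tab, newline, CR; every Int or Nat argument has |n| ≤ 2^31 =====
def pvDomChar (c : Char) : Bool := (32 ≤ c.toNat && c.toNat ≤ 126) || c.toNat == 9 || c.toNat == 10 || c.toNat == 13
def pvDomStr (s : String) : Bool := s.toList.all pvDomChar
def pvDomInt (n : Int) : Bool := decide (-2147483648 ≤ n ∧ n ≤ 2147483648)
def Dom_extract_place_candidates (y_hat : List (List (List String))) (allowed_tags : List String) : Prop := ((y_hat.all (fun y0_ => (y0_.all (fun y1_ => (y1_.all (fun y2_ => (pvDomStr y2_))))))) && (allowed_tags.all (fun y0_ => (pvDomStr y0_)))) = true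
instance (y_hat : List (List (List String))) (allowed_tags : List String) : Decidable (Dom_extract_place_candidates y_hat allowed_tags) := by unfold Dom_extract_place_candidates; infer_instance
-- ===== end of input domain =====

-- B replaces A's per-B-tag nested rescan by a two-pointer segmentation into maximal
-- allowed runs, emitting each span straight to the run end (objective: alternative).

-- ===== PORT A =====
-- A's inner 'for ftid, future_tag in enumerate(future_tags, start=tag_id): break/append' loop.
-- tokens.getD ftid "" is exact while ftid < tokens.length (Pre_ guarantees it; Python raises IndexError beyond).
def epcSubsetA (tokens allowed : List String) : List String → Nat → List String → List String
  | [], _, subset => subset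
  | ft :: rest, ftid, subset =>
    if ft ∈ allowed then epcSubsetA tokens allowed rest (ftid + 1) (subset ++ [tokens.getD ftid ""])
    else subset

-- the body of A's outer loop for one sentence (tokens, tags): builds places[index]
def epcSentA (allowed tokens tags : List String) : PySem.Dict String (List String) :=
  (PySem.List.enumerate tags).foldl (fun d p =>
    if PySem.Str.isIn "B-" p.2 then
      -- '_, tag_root = tag.split("-")': exact under Pre_ (exactly one '-', so exactly 2 parts)
      let tag_root := ((PySem.Str.split? p.2 "-").getD []).getD 1 ""
      let d := if p.2 ∈ allowed ∧ d.contains tag_root = false then d.insert tag_root [] else d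
      let subset := epcSubsetA tokens allowed (PySem.List.slice tags (some p.1) none) p.1.toNat []
      -- places[index][tag_root].append(...): the key is always present when subset ≠ [] (tag ∈ allowed), so modify is exact
      if subset ≠ [] then d.modify tag_root [] (fun l => l ++ [PySem.Str.join " " subset]) else d
    else d) PySem.Dict.empty

-- sentence unpacking '(tokens, tags)' is exact under Pre_ (each sentence has exactly 2 elements)
def extract_place_candidates (y_hat : List (List (List String))) (allowed_tags : List String) : List (Int × List (String × List String)) :=
  (((PySem.List.enumerate y_hat).foldl (fun pl p =>
      pl.insert p.1 (epcSentA allowed_tags (p.2.getD 0 []) (p.2.getD 1 [])))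
    (PySem.Dict.empty : PySem.Dict Int (PySem.Dict String (List String)))).items).map
    (fun q => (q.1, q.2.items))

-- ===== PORT B =====
-- B's inner two-pointer loop 'e = i + 1; while e < n and tags[e] in allowed: e += 1':
-- how far the allowed run extends into the remaining tags
def epcRunLen (allowed : PySem.Set String) : List String → Nat
  | [] => 0
  | t :: rest => if t ∈ allowed then epcRunLen allowed rest + 1 else 0

-- B's 'for j, tag in enumerate(tags[i:e], start=i)' loop over one maximal run:
-- every span ends at the fixed run end e; tokens[k] ported as pyGetD (exact under Pre_)
def epcRunB (tokens : List String) (e : Int) (run : List (Int × String))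
    (d : PySem.Dict String (List String)) : PySem.Dict String (List String) :=
  run.foldl (fun d p =>
    if PySem.Str.isIn "B-" p.2 then
      -- "tag.split('-')[1]": exact under Pre_ (exactly one '-')
      let root := ((PySem.Str.split? p.2 "-").getD []).getD 1 ""
      (d.setdefault root []).modify root []
        (fun l => l ++ [PySem.Str.join " "
          ((PySem.List.pyRange p.1 e 1).map (fun k => PySem.List.pyGetD tokens k ""))])
    else d) d

-- B's outer 'while i < n' loop over one sentence, as recursion on the remaining tags
-- (the suffix tags[i:]; 'tags[i:e]' is the first e-i elements of that suffix)
def epcScan (allowed : PySem.Set String) (tokens : List String) :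
    List String → Nat → PySem.Dict String (List String) → PySem.Dict String (List String)
  | [], _, d => d
  | t :: rest, i, d =>
    if t ∈ allowed then
      let L := epcRunLen allowed rest + 1
      let d' := epcRunB tokens ((i : Int) + (L : Int))
        (PySem.List.enumerate ((t :: rest).take L) (i : Int)) d
      epcScan allowed tokens (rest.drop (L - 1)) (i + L) d'
    else epcScan allowed tokens rest (i + 1) d
  termination_by l => l.length
  decreasing_by
    · simp only [List.length_drop, List.length_cons]; omega
    · simp only [List.length_cons]; omega

-- B's '{index: entry for index, (tokens, tags) in enumerate(y_hat)}' over fresh increasing keys;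
-- 'allowed = set(allowed_tags)' is PySem.Set.ofList
def extract_place_candidates_alt (y_hat : List (List (List String))) (allowed_tags : List String) : List (Int × List (String × List String)) :=
  (PySem.List.enumerate y_hat).map (fun p =>
    (p.1, (epcScan (PySem.Set.ofList allowed_tags) (p.2.getD 0 []) (p.2.getD 1 []) 0
            PySem.Dict.empty).items))

-- ===== PRECONDITION & SPEC =====
-- Pre_ excludes exactly the inputs where the Python A raises: a sentence that is not a
-- [tokens, tags] pair (ValueError on unpacking), a tag containing "B-" with a number of
-- '-' other than one (ValueError on '_, tag_root = tag.split("-")'), and a rebuild loop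
-- that runs past the end of tokens (IndexError on tokens[ftid]).
def Pre_extract_place_candidates (y_hat : List (List (List String))) (allowed_tags : List String) : Prop :=
  (y_hat.all (fun s =>
    s.length == 2 &&
    ((s.getD 1 []).all (fun tg => !PySem.Str.isIn "B-" tg || PySem.Str.count tg "-" == 1)) &&
    ((List.range (s.getD 1 []).length).all (fun i =>
      !PySem.Str.isIn "B-" ((s.getD 1 []).getD i "") ||
      (List.range (s.getD 1 []).length).all (fun j =>
        decide (j < i) ||
        !(((s.getD 1 []).drop i).take (j + 1 - i)).all (fun tg => decide (tg ∈ allowed_tags)) ||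
        decide (j < (s.getD 0 []).length)))))) = true
instance (y_hat : List (List (List String))) (allowed_tags : List String) : Decidable (Pre_extract_place_candidates y_hat allowed_tags) := by unfold Pre_extract_place_candidates; infer_instance

def pvWitness_extract_place_candidates : List (List (List String)) × List String :=
  ([[["Rome", "is", "nice"], ["B-LOC", "O", "O"]], [["New", "York", "now"], ["B-LOC", "I-LOC", "O"]]],
   ["B-LOC", "I-LOC"])

def Spec_extract_place_candidates (y_hat : List (List (List String))) (allowed_tags : List String) (out : List (Int × List (String × List String))) : Prop := out = extract_place_candidates_alt y_hat allowed_tags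
instance (y_hat : List (List (List String))) (allowed_tags : List String) (out : List (Int × List (String × List String))) : Decidable (Spec_extract_place_candidates y_hat allowed_tags out) := by unfold Spec_extract_place_candidates; infer_instance

-- ===== CLAIM (what is proved, stated in full; the proofs are below) =====
def Claim_equal_extract_place_candidates : Prop := ∀ (y_hat : List (List (List String))) (allowed_tags : List String), Dom_extract_place_candidates y_hat allowed_tags → Pre_extract_place_candidates y_hat allowed_tags → Spec_extract_place_candidates y_hat allowed_tags (extract_place_candidates y_hat allowed_tags)

-- ===== LEMMAS AND PROOFS =====

def epcStep (tokens allowed : List String) (t : String) (tail : List String) (i : Nat)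
    (d : PySem.Dict String (List String)) : PySem.Dict String (List String) :=
  if PySem.Str.isIn "B-" t then
    let root := ((PySem.Str.split? t "-").getD []).getD 1 ""
    let d' := if t ∈ allowed ∧ d.contains root = false then d.insert root [] else d
    let span := (List.range' i (((t :: tail).takeWhile (fun s => decide (s ∈ allowed))).length)).map
      (fun j => tokens.getD j "")
    if span ≠ [] then d'.modify root [] (fun l => l ++ [PySem.Str.join " " span]) else d'
  else d

def epcSpec (tokens allowed : List String) : List String → Nat → PySem.Dict String (List String) → PySem.Dict String (List String)
  | [], _, d => d
  | t :: rest, i, d => epcSpec tokens allowed rest (i + 1) (epcStep tokens allowed t rest i d)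

theorem epcSubsetA_eq (tokens allowed : List String) :
    ∀ (fts : List String) (i : Nat) (acc : List String),
      epcSubsetA tokens allowed fts i acc =
        acc ++ (List.range' i ((fts.takeWhile (fun t => decide (t ∈ allowed))).length)).map
          (fun j => tokens.getD j "") := by
  intro fts
  induction fts with
  | nil => intro i acc; simp [epcSubsetA]
  | cons ft rest ih =>
    intro i acc
    by_cases h : ft ∈ allowed
    · simp only [epcSubsetA, if_pos h, List.takeWhile_cons, decide_eq_true h, if_pos,
        List.length_cons, List.range'_succ, List.map_cons, ih]
      simp
    · simp [epcSubsetA, h]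

def epcBodyA (tokens allowed tags : List String)
    (d : PySem.Dict String (List String)) (p : Int × String) : PySem.Dict String (List String) :=
  if PySem.Str.isIn "B-" p.2 then
    let tag_root := ((PySem.Str.split? p.2 "-").getD []).getD 1 ""
    let d := if p.2 ∈ allowed ∧ d.contains tag_root = false then d.insert tag_root [] else d
    let subset := epcSubsetA tokens allowed (PySem.List.slice tags (some p.1) none) p.1.toNat []
    if subset ≠ [] then d.modify tag_root [] (fun l => l ++ [PySem.Str.join " " subset]) else d
  else d

theorem epcBodyA_eq_step (tokens allowed tags : List String) (t : String) (rest : List String)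
    (i : Nat) (d : PySem.Dict String (List String)) (h : tags.drop i = t :: rest) :
    epcBodyA tokens allowed tags d ((i : Int), t) = epcStep tokens allowed t rest i d := by
  unfold epcBodyA epcStep
  rw [PySem.List.slice_from_natCast, h]
  simp only [Int.toNat_natCast, epcSubsetA_eq, List.nil_append]

theorem epcFoldA_eq_spec (allowed tokens tags : List String) :
    ∀ (l : List String) (i : Nat) (d : PySem.Dict String (List String)),
      tags.drop i = l →
      (PySem.List.enumerate l (i : Int)).foldl (epcBodyA tokens allowed tags) d
        = epcSpec tokens allowed l i d := by
  intro l
  induction l with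
  | nil => intro i d h; simp [PySem.List.enumerate_nil, epcSpec]
  | cons t rest ih =>
    intro i d h
    rw [PySem.List.enumerate_cons, List.foldl_cons]
    have hc : (i : Int) + 1 = ((i + 1 : Nat) : Int) := by push_cast; ring
    have hdrop : tags.drop (i + 1) = rest := by
      rw [← List.tail_drop, h]; rfl
    rw [hc, ih (i + 1) _ hdrop]
    show epcSpec tokens allowed rest (i + 1) (epcBodyA tokens allowed tags d ((i : Int), t)) =
      epcSpec tokens allowed (t :: rest) i d
    rw [epcBodyA_eq_step tokens allowed tags t rest i d h]
    rfl

theorem epcSentA_eq_spec (allowed tokens tags : List String) :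
    epcSentA allowed tokens tags = epcSpec tokens allowed tags 0 PySem.Dict.empty := by
  have h0 : epcSentA allowed tokens tags =
      (PySem.List.enumerate tags ((0 : Nat) : Int)).foldl (epcBodyA tokens allowed tags)
        PySem.Dict.empty := rfl
  rw [h0, epcFoldA_eq_spec allowed tokens tags tags 0 _ (by simp)]

theorem epcRunLen_eq (allowedL : List String) (l : List String) :
    epcRunLen (PySem.Set.ofList allowedL) l =
      (l.takeWhile (fun s => decide (s ∈ allowedL))).length := by
  induction l with
  | nil => rfl
  | cons t rest ih =>
    by_cases h : t ∈ allowedL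
    · simp [epcRunLen, PySem.Set.mem_ofList, h, ih]
    · simp [epcRunLen, PySem.Set.mem_ofList, h]

-- the ported comprehension '[tokens[k] for k in range(j, e)]' over natural bounds

theorem epcSpanNat (tokens : List String) (a L : Nat) :
    (PySem.List.pyRange (a : Int) ((a : Int) + (L : Int)) 1).map
        (fun k => PySem.List.pyGetD tokens k "") =
      (List.range' a L).map (fun j => tokens.getD j "") := by
  induction L generalizing a with
  | zero => simp [PySem.List.pyRange]
  | succ n ih =>
    rw [PySem.List.pyRange_one_cons (by push_cast; omega)]
    have h1 : (a : Int) + 1 = ((a + 1 : Nat) : Int) := by push_cast; ring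
    have h2 : ((a + 1 : Nat) : Int) + ((n : Nat) : Int) = (a : Int) + ((n + 1 : Nat) : Int) := by
      push_cast; ring
    rw [List.map_cons, h1, ← h2, ih]
    simp [List.range'_succ]

-- a step at a non-allowed tag does nothing (empty span, no key creation)

theorem epcStep_of_not_mem (tokens allowed : List String) (t : String) (tail : List String)
    (i : Nat) (d : PySem.Dict String (List String)) (h : t ∉ allowed) :
    epcStep tokens allowed t tail i d = d := by
  unfold epcStep
  simp [h]

-- one iteration of B's run loop is exactly the spec step (inside a run the
-- remaining takeWhile is the remaining run, so the span ends at the run end)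

theorem epcRunStep_eq (tokens allowedL : List String) (t : String) (run' tail : List String)
    (i : Nat) (d : PySem.Dict String (List String)) (ht : t ∈ allowedL)
    (htw : (t :: (run' ++ tail)).takeWhile (fun s => decide (s ∈ allowedL)) = t :: run') :
    (if PySem.Str.isIn "B-" t then
      let root := ((PySem.Str.split? t "-").getD []).getD 1 ""
      (d.setdefault root []).modify root []
        (fun l => l ++ [PySem.Str.join " "
          ((PySem.List.pyRange (i : Int) ((i : Int) + ((run'.length + 1 : Nat) : Int)) 1).map
            (fun k => PySem.List.pyGetD tokens k ""))])
    else d) = epcStep tokens allowedL t (run' ++ tail) i d := by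
  unfold epcStep
  by_cases hB : PySem.Str.isIn "B-" t
  · simp only [hB, if_true, htw, List.length_cons]
    have hspan : ((List.range' i (run'.length + 1)).map (fun j => tokens.getD j "")) ≠ [] := by
      simp [List.range'_succ]
    rw [if_pos hspan]
    rw [epcSpanNat tokens i (run'.length + 1)]
    generalize (((PySem.Str.split? t "-").getD []).getD 1 "") = root
    by_cases hc : d.contains root = true
    · rw [PySem.Dict.setdefault_of_contains d _ hc, if_neg (by simp [hc])]
    · rw [PySem.Dict.setdefault_of_not_contains d _ (by simpa using hc),
        if_pos ⟨ht, by simpa using hc⟩]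
  · have hB' : PySem.Chars.isIn ['B', '-'] t.toList = false := by
      simpa [PySem.Str.isIn] using hB
    simp [hB']

-- B's inner run loop performs exactly one spec step per run position-- B's inner run loop performs exactly one spec step per run position

theorem epcRunB_eq_spec (tokens allowedL : List String) :
    ∀ (run tail : List String) (i : Nat) (d : PySem.Dict String (List String)),
      (run ++ tail).takeWhile (fun s => decide (s ∈ allowedL)) = run →
      epcSpec tokens allowedL (run ++ tail) i d =
        epcSpec tokens allowedL tail (i + run.length)
          (epcRunB tokens ((i : Int) + (run.length : Int))
            (PySem.List.enumerate run (i : Int)) d) := by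
  intro run
  induction run with
  | nil => intro tail i d _; simp [epcRunB, PySem.List.enumerate_nil]
  | cons t run' ih =>
    intro tail i d htw
    have ht : t ∈ allowedL := by
      by_contra h
      rw [List.cons_append, List.takeWhile_cons] at htw
      simp [h] at htw
    have htw' : (run' ++ tail).takeWhile (fun s => decide (s ∈ allowedL)) = run' := by
      rw [List.cons_append, List.takeWhile_cons] at htw
      simp [ht] at htw
      exact htw
    -- unfold one spec step on the left and one run-fold step on the right
    show epcSpec tokens allowedL (run' ++ tail) (i + 1)
        (epcStep tokens allowedL t (run' ++ tail) i d) = _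
    rw [ih tail (i + 1) _ htw']
    rw [PySem.List.enumerate_cons]
    show _ = epcSpec tokens allowedL tail (i + (t :: run').length)
      (epcRunB tokens ((i : Int) + (((t :: run').length : Nat) : Int))
        (PySem.List.enumerate run' ((i : Int) + 1))
        (if PySem.Str.isIn "B-" t then _ else d))
    have hlen : i + (t :: run').length = i + 1 + run'.length := by simp; omega
    have hc1 : (i : Int) + 1 = ((i + 1 : Nat) : Int) := by push_cast; ring
    have hce : (i : Int) + (((t :: run').length : Nat) : Int)
        = ((i + 1 : Nat) : Int) + ((run'.length : Nat) : Int) := by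
      simp only [List.length_cons]; push_cast; ring
    rw [hlen, hc1, hce]
    congr 1
    have := epcRunStep_eq tokens allowedL t run' tail i d ht
      htw
    rw [show ((i : Int) + ((run'.length + 1 : Nat) : Int)) = ((i + 1 : Nat) : Int) + ((run'.length : Nat) : Int) from by push_cast; ring] at this
    rw [← this]

-- take of the takeWhile length is the takeWhile

theorem epcTakeTW {α : Type} (p : α → Bool) (l : List α) :
    l.take ((l.takeWhile p).length) = l.takeWhile p := by
  induction l with
  | nil => rfl
  | cons x xs ih =>
    by_cases h : p x
    · simp [h, ih]
    · simp [h]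

theorem epcScan_eq_spec (allowedL tokens : List String) :
    ∀ (l : List String) (i : Nat) (d : PySem.Dict String (List String)),
      epcScan (PySem.Set.ofList allowedL) tokens l i d = epcSpec tokens allowedL l i d := by
  suffices H : ∀ (n : Nat) (l : List String), l.length ≤ n →
      ∀ (i : Nat) (d : PySem.Dict String (List String)),
        epcScan (PySem.Set.ofList allowedL) tokens l i d = epcSpec tokens allowedL l i d by
    intro l i d; exact H l.length l le_rfl i d
  intro n
  induction n with
  | zero =>
    intro l hl i d
    have : l = [] := List.eq_nil_of_length_eq_zero (Nat.le_zero.mp hl)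
    subst this
    rw [epcScan]; rfl
  | succ n ih =>
    intro l hl i d
    cases l with
    | nil => rw [epcScan]; rfl
    | cons t rest =>
      by_cases h : t ∈ allowedL
      · have hmem : t ∈ PySem.Set.ofList allowedL := (PySem.Set.mem_ofList _ _).mpr h
        rw [epcScan, if_pos hmem]
        simp only [epcRunLen_eq]
        set tw := rest.takeWhile (fun s => decide (s ∈ allowedL)) with htw_def
        set dw := rest.dropWhile (fun s => decide (s ∈ allowedL)) with hdw_def
        have hsplit : tw ++ dw = rest := List.takeWhile_append_dropWhile
        have htake : (t :: rest).take (tw.length + 1) = t :: tw := by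
          rw [List.take_succ_cons]
          congr 1
          rw [htw_def]
          exact epcTakeTW _ rest
        have hdrop : rest.drop (tw.length + 1 - 1) = dw := by
          rw [Nat.add_sub_cancel, ← hsplit, List.drop_left]
        rw [htake, hdrop]
        have htw2 : ((t :: tw) ++ dw).takeWhile (fun s => decide (s ∈ allowedL)) = t :: tw := by
          rw [List.cons_append, List.takeWhile_cons, hsplit]
          simp [h, htw_def]
        have hrhs : epcSpec tokens allowedL (t :: rest) i d
            = epcSpec tokens allowedL ((t :: tw) ++ dw) i d := by
          rw [List.cons_append, hsplit]
        rw [hrhs, epcRunB_eq_spec tokens allowedL (t :: tw) dw i d htw2]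
        have hlen : (t :: tw).length = tw.length + 1 := by simp
        rw [hlen]
        have hle : dw.length ≤ n := by
          have h1 : dw.length ≤ rest.length := by rw [hdw_def]; exact List.length_dropWhile_le _ _
          have h2 : rest.length ≤ n := by simpa using Nat.lt_succ_iff.mp (by simpa using hl)
          omega
        rw [ih dw hle]
      · have hmem : t ∉ PySem.Set.ofList allowedL := fun hc => h ((PySem.Set.mem_ofList _ _).mp hc)
        rw [epcScan, if_neg hmem]
        rw [ih rest (by simpa using Nat.lt_succ_iff.mp (by simpa using hl)) (i + 1) d]
        show _ = epcSpec tokens allowedL rest (i + 1) (epcStep tokens allowedL t rest i d)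
        rw [epcStep_of_not_mem tokens allowedL t rest i d h]

-- A's outer dict-insert loop over fresh increasing keys appends, i.e. it is B's map
theorem epcOuter_items (allowed : List String) (y_hat : List (List (List String))) :
    (((PySem.List.enumerate y_hat).foldl (fun pl p =>
        pl.insert p.1 (epcSentA allowed (p.2.getD 0 []) (p.2.getD 1 [])))
      (PySem.Dict.empty : PySem.Dict Int (PySem.Dict String (List String)))).items) =
    (PySem.List.enumerate y_hat).map
      (fun p => (p.1, epcSentA allowed (p.2.getD 0 []) (p.2.getD 1 []))) := by
  have h1 : ∀ a ∈ PySem.List.enumerate y_hat,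
      (PySem.Dict.empty : PySem.Dict Int (PySem.Dict String (List String))).contains a.1 = false := by
    intro a _; rfl
  have h2 : (List.map (fun p => p.1) (PySem.List.enumerate y_hat)).Nodup :=
    List.pairwise_map.2 ((PySem.List.pairwise_lt_enumerate y_hat 0).imp fun hlt => ne_of_lt hlt)
  rw [PySem.Dict.items_foldl_insert_fresh (PySem.List.enumerate y_hat) (fun p => p.1)
      (fun p => epcSentA allowed (p.2.getD 0 []) (p.2.getD 1 [])) PySem.Dict.empty h1 h2]
  simp [PySem.Dict.empty]

-- ===== VERDICT (by name: the statement is the Claim_ definition above) =====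
theorem extract_place_candidates_spec : Claim_equal_extract_place_candidates := by
  intro y_hat allowed_tags _ _
  unfold Spec_extract_place_candidates
  unfold extract_place_candidates extract_place_candidates_alt
  rw [epcOuter_items]
  simp only [List.map_map]
  refine List.map_congr_left ?_
  intro p _
  have hs : epcSentA allowed_tags (p.2.getD 0 []) (p.2.getD 1 [])
      = epcScan (PySem.Set.ofList allowed_tags) (p.2.getD 0 []) (p.2.getD 1 []) 0
          PySem.Dict.empty := by
    rw [epcSentA_eq_spec, epcScan_eq_spec]
  simp only [Function.comp_apply]
  rw [hs]
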